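-- pv_equiv track=rewrite | github.com/ochavarria/Proyectos-TEC | Progras/Python/Introduccion/Calendario.py | buscando_Titulo2
-- ===== SOURCE A (Python) =====
-- def pertenece(lista,inp):
--     if(lista==[]):
--         return False
--     else:
--         if(lista[0]==inp):
--             return True
--         else:
--             return pertenece(lista[1:],inp)
--
-- def buscando_Titulo2(lista,titulo):
--     if(lista==[]):
--         return []
--     else:
--         if(pertenece(lista[0],titulo)):
--             return lista[0] +list('   ')+ buscando_Titulo2(lista[1:],titulo)
--
--         else:
--             return buscando_Titulo2(lista[1:],titulo)
-- ===== SOURCE B (Python) =====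
-- def buscando_Titulo2(lista, titulo):
--     result = []
--     for sub in lista:
--         if titulo in sub:
--             result.extend(sub)
--             result.extend([' ', ' ', ' '])
--     return result
-- ===== Notes on version B (the rewrite author's own statement) =====
-- stated objective: faster
-- what changed: Replaces the double recursion (list recursion with lista[1:] copies plus a hand-written recursive membership scan) with a single iterative loop using the built-in `in` and extend onto one accumulator.
import Mathlib
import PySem

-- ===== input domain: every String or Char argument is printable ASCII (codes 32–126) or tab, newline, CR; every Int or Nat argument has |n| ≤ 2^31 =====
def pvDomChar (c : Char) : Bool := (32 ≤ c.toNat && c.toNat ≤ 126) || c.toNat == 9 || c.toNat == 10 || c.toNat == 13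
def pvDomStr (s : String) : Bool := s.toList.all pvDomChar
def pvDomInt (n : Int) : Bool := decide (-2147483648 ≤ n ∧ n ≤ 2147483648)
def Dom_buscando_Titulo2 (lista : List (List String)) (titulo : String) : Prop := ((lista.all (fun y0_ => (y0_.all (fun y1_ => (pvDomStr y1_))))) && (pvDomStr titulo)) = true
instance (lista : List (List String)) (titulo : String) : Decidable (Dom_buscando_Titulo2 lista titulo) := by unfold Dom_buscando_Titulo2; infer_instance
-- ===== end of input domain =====

-- B: one iterative loop with the built-in membership test and an accumulator, replacing A's double recursion (simpler; same cost).
-- ===== PORT A =====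
def pertenece (lista : List String) (inp : String) : Bool :=
  match lista with
  | [] => false
  | x :: rest => if x == inp then true else pertenece rest inp

def buscando_Titulo2 (lista : List (List String)) (titulo : String) : List String :=
  match lista with
  | [] => []
  | x :: rest =>
    if pertenece x titulo then x ++ [" ", " ", " "] ++ buscando_Titulo2 rest titulo
    else buscando_Titulo2 rest titulo

-- ===== PORT B =====
def buscando_Titulo2_alt (lista : List (List String)) (titulo : String) : List String :=
  lista.foldl (fun result sub =>
    if titulo ∈ sub then result ++ sub ++ [" ", " ", " "] else result) []

-- ===== PRECONDITION & SPEC =====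
def Spec_buscando_Titulo2 (lista : List (List String)) (titulo : String) (out : List String) : Prop := out = buscando_Titulo2_alt lista titulo
instance (lista : List (List String)) (titulo : String) (out : List String) : Decidable (Spec_buscando_Titulo2 lista titulo out) := by unfold Spec_buscando_Titulo2; infer_instance

-- ===== CLAIM (what is proved, stated in full; the proofs are below) =====
def Claim_equal_buscando_Titulo2 : Prop := ∀ (lista : List (List String)) (titulo : String), Dom_buscando_Titulo2 lista titulo → Spec_buscando_Titulo2 lista titulo (buscando_Titulo2 lista titulo)

-- ===== LEMMAS AND PROOFS =====

-- ===== VERDICT (by name: the statement is the Claim_ definition above) =====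
lemma pertenece_eq_mem (lista : List String) (inp : String) :
    pertenece lista inp = decide (inp ∈ lista) := by
  induction lista with
  | nil => simp [pertenece]
  | cons x rest ih =>
    simp only [pertenece, ih, List.mem_cons]
    by_cases h : x = inp
    · simp [h]
    · simp [h]
      intro hh; exact absurd hh.symm h

lemma alt_foldl_acc (lista : List (List String)) (titulo : String) (acc : List String) :
    lista.foldl (fun result sub =>
      if titulo ∈ sub then result ++ sub ++ [" ", " ", " "] else result) acc
    = acc ++ lista.foldl (fun result sub =>
      if titulo ∈ sub then result ++ sub ++ [" ", " ", " "] else result) [] := by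
  induction lista generalizing acc with
  | nil => simp
  | cons x rest ih =>
    simp only [List.foldl_cons]
    rw [ih, ih (if titulo ∈ x then [] ++ x ++ [" ", " ", " "] else [])]
    by_cases h : titulo ∈ x <;> simp [h]

lemma main_eq (lista : List (List String)) (titulo : String) :
    buscando_Titulo2 lista titulo = buscando_Titulo2_alt lista titulo := by
  induction lista with
  | nil => rfl
  | cons x rest ih =>
    simp only [buscando_Titulo2, buscando_Titulo2_alt, List.foldl_cons,
      pertenece_eq_mem] at *
    rw [alt_foldl_acc]
    by_cases h : titulo ∈ x <;> simp [h, ih]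

theorem buscando_Titulo2_spec : Claim_equal_buscando_Titulo2 := by
  intro lista titulo _
  exact main_eq lista titulo
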